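-- pv_equiv track=rewrite | github.com/danagle/everybody-codes-challenges | 2025-the-songs-of-ducks-and-dragons/quest16.py | get_spell_numbers
-- ===== SOURCE A (Python) =====
-- def get_spell_numbers(numbers):
--     """
--     Extracts the spell numbers used to construct the wall.
--     """
--     # Number of wall positions
--     length = len(numbers)
--
--     # Simulated wall heights
--     simulated = [0] * length
--
--     spell_numbers = []
--
--     # Walk through each wall position
--     for i in range(length):
--         real = numbers[i]    # actual wall height at position i
--         simh = simulated[i]  # current simulated height at position i
--
--         # A new spell is needed if the real height exceeds the current simulated height
--         if real > simh:
--             diff = real - simh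
--             pos = i + 1  # spell number is 1-based index
--
--             spell_numbers.append(pos)
--
--             # Apply the spell: raise every multiple of 'pos' starting at i
--             j = i
--             while j < length:
--                 simulated[j] += diff
--                 j += pos
--
--     # Return all discovered spell numbers
--     return spell_numbers
-- ===== SOURCE B (Python) =====
-- def _sim_height(spell_diff, n):
--     # simulated height at wall position n-1: sum of recorded diffs over the proper
--     # divisors of n, enumerated in divisor pairs (d, n//d) with d up to sqrt(n)
--     simh = 0
--     d = 1
--     while d * d <= n:
--         if n % d == 0:
--             e = n // d
--             if d < n and d in spell_diff:
--                 simh += spell_diff[d]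
--             if e != d and e < n and e in spell_diff:
--                 simh += spell_diff[e]
--         d += 1
--     return simh
--
--
-- def get_spell_numbers(numbers):
--     spell_numbers = []
--     spell_diff = {}
--     for i in range(len(numbers)):
--         n = i + 1
--         simh = _sim_height(spell_diff, n)
--         if numbers[i] > simh:
--             spell_numbers.append(n)
--             spell_diff[n] = numbers[i] - simh
--     return spell_numbers
-- ===== Notes on version B (the rewrite author's own statement) =====
-- stated objective: alternative
-- what changed: Replaces A's push-style simulation (a mutable simulated-heights array plus an inner while loop adding each new spell's diff to every multiple of its position) with a pull-style computation: a dict of recorded spell diffs, and each position's simulated height is recomputed on demand as the sum of recorded diffs over the proper divisors of the 1-based index, enumerated in (d, n//d) pairs with d up to sqrt(n).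
import Mathlib
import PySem

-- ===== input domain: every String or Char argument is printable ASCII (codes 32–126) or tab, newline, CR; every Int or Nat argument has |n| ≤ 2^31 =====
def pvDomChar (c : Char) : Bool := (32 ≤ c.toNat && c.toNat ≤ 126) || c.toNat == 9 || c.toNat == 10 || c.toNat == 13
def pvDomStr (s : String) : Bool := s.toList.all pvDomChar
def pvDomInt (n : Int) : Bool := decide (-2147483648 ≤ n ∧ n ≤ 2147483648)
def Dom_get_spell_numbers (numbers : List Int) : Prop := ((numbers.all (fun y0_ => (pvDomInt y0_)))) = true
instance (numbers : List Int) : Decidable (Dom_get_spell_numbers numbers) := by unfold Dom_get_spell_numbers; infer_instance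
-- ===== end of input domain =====

-- B replaces A's push-style spell application (inner while loop over multiples into a
-- simulated-heights array) by a pull-style dict of recorded spell diffs, summing over the
-- proper divisors of each position; same results, different decomposition (objective: alternative).

-- ===== PORT A =====
-- inner 'while j < length: simulated[j] += diff; j += pos' with pos = i+1 (always in range, so
-- the reads/writes use getD/set; exact since j < length is checked first)
def applySpellA (sim : List Int) (j i : Nat) (diff : Int) : List Int :=
  if h : j < sim.length then
    applySpellA (sim.set j (sim.getD j 0 + diff)) (j + (i + 1)) i diff
  else sim
termination_by sim.length - j
decreasing_by simp [List.length_set]; omega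

-- loop body of 'for i in range(length)'; numbers[i] / simulated[i] read with i < length, exact
def stepA (numbers : List Int) (st : List Int × List Int) (i : Nat) : List Int × List Int :=
  let real := numbers.getD i 0
  let simh := st.1.getD i 0
  if real > simh then
    (applySpellA st.1 i i (real - simh), st.2 ++ [(i : Int) + 1])
  else st

def get_spell_numbers (numbers : List Int) : List Int :=
  ((List.range numbers.length).foldl (stepA numbers)
    (List.replicate numbers.length (0 : Int), [])).2

-- ===== PORT B =====
-- 'while d * d <= n: if n % d == 0: e = n // d; add spell_diff[d] / spell_diff[e] …; d += 1'
def sqrtLoopB (dct : PySem.Dict Int Int) (n d : Nat) (simh : Int) : Int :=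
  if _h : d * d ≤ n then
    sqrtLoopB dct n (d + 1)
      (if n % d = 0 then
        let e := n / d
        let s1 := if d < n then
            (match dct.get? (d : Int) with
             | some v => simh + v
             | none => simh)
          else simh
        if e ≠ d ∧ e < n then
          (match dct.get? ((e : Nat) : Int) with
           | some v => s1 + v
           | none => s1)
        else s1
      else simh)
  else simh
termination_by n + 1 - d
decreasing_by
  rcases Nat.eq_zero_or_pos d with h0 | h0
  · omega
  · have hle : d ≤ d * d := Nat.le_mul_of_pos_left d h0
    omega

def simHeightB (dct : PySem.Dict Int Int) (n : Nat) : Int := sqrtLoopB dct n 1 0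

def stepB (numbers : List Int) (st : List Int × PySem.Dict Int Int) (i : Nat) :
    List Int × PySem.Dict Int Int :=
  let n := i + 1
  let simh := simHeightB st.2 n
  if numbers.getD i 0 > simh then
    (st.1 ++ [(n : Int)], st.2.insert (n : Int) (numbers.getD i 0 - simh))
  else st

def get_spell_numbers_alt (numbers : List Int) : List Int :=
  ((List.range numbers.length).foldl (stepB numbers) ([], PySem.Dict.empty)).1

-- ===== PRECONDITION & SPEC =====
def Spec_get_spell_numbers (numbers : List Int) (out : List Int) : Prop := out = get_spell_numbers_alt numbers
instance (numbers : List Int) (out : List Int) : Decidable (Spec_get_spell_numbers numbers out) := by unfold Spec_get_spell_numbers; infer_instance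

-- ===== CLAIM (what is proved, stated in full; the proofs are below) =====
def Claim_equal_get_spell_numbers : Prop := ∀ (numbers : List Int), Dom_get_spell_numbers numbers → Spec_get_spell_numbers numbers (get_spell_numbers numbers)

-- ===== LEMMAS AND PROOFS =====

-- divisor-sum of the recorded diffs over d = 1..m dividing k+1
def simAt (dct : PySem.Dict Int Int) (m k : Nat) : Int :=
  (List.range' 1 m).foldl (fun acc d => if (k + 1) % d = 0 then acc + dct.getD (d : Int) 0 else acc) 0

lemma simAt_succ (dct : PySem.Dict Int Int) (m k : Nat) :
    simAt dct (m + 1) k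
      = simAt dct m k + (if (k + 1) % (m + 1) = 0 then dct.getD ((m : Int) + 1) 0 else 0) := by
  unfold simAt
  rw [List.range'_1_concat, List.foldl_append]
  simp only [List.foldl_cons, List.foldl_nil]
  have : (1 + m : Nat) = m + 1 := by omega
  rw [this]
  split_ifs with h
  · push_cast; ring_nf
  · ring

-- the contribution of one trial divisor d in B's sqrt loop (the pair d, n/d)
def contrib (dct : PySem.Dict Int Int) (n x : Nat) : Int :=
  (if x < n then dct.getD (x : Int) 0 else 0)
  + (if n / x ≠ x ∧ n / x < n then dct.getD ((n / x : Nat) : Int) 0 else 0)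

lemma sqrtLoopB_eq_sum (dct : PySem.Dict Int Int) (n : Nat) (d : Nat) (simh : Int) :
    sqrtLoopB dct n d simh
      = simh + ∑ x ∈ Finset.Ico d (Nat.sqrt n + 1), (if n % x = 0 then contrib dct n x else 0) := by
  induction d, simh using sqrtLoopB.induct dct n with
  | case1 d simh h ih =>
    simp only [dite_eq_ite] at ih
    rw [sqrtLoopB, dif_pos h, ih,
      Finset.sum_eq_sum_Ico_succ_bot
        (show d < Nat.sqrt n + 1 by have := Nat.le_sqrt.mpr h; omega)]
    simp only [contrib, PySem.Dict.getD_eq_get?_getD]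
    split_ifs <;>
      rcases hg1 : dct.get? (d : Int) with _ | v1 <;>
      rcases hg2 : dct.get? ((n / d : Nat) : Int) with _ | v2 <;>
      simp [hg1, hg2] <;> ring
  | case2 d simh h =>
    rw [sqrtLoopB]
    simp only [h, dif_neg, not_false_iff]
    rw [Finset.Ico_eq_empty (by have := Nat.sqrt_lt.mpr (by omega : n < d * d); omega)]
    simp

lemma simAt_eq_sum (dct : PySem.Dict Int Int) (m k : Nat) :
    simAt dct m k
      = ∑ x ∈ Finset.Ico 1 (m + 1), (if (k + 1) % x = 0 then dct.getD (x : Int) 0 else 0) := by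
  induction m with
  | zero => simp [simAt]
  | succ m ih =>
    rw [simAt_succ, ih, Finset.sum_Ico_succ_top (a := 1) (b := m + 1) (by omega)]
    norm_cast

-- the divisor-pairing: summing the (d, n/d) contributions for d ≤ √n counts each proper
-- divisor of n exactly once
lemma divisor_pairing (dct : PySem.Dict Int Int) (n : Nat) (hn : 1 ≤ n) :
    ∑ x ∈ Finset.Ico 1 (Nat.sqrt n + 1), (if n % x = 0 then contrib dct n x else 0)
      = ∑ x ∈ Finset.Ico 1 n, (if n % x = 0 then dct.getD (x : Int) 0 else 0) := by
  rw [← Finset.sum_filter, ← Finset.sum_filter]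
  simp only [contrib]
  rw [Finset.sum_add_distrib, ← Finset.sum_filter, ← Finset.sum_filter]
  have hsmall : ((Finset.Ico 1 (Nat.sqrt n + 1)).filter (fun x => n % x = 0)).filter (fun x => x < n)
      = ((Finset.Ico 1 n).filter (fun x => n % x = 0)).filter (fun x => x * x ≤ n) := by
    apply Finset.ext
    intro x
    simp only [Finset.mem_filter, Finset.mem_Ico]
    constructor
    · rintro ⟨⟨⟨h1, h2⟩, h3⟩, h4⟩
      exact ⟨⟨⟨h1, h4⟩, h3⟩, Nat.le_sqrt.mp (by omega)⟩
    · rintro ⟨⟨⟨h1, h2⟩, h3⟩, h4⟩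
      have := Nat.le_sqrt.mpr h4
      exact ⟨⟨⟨h1, by omega⟩, h3⟩, h2⟩
  have hbij : ∑ x ∈ ((Finset.Ico 1 (Nat.sqrt n + 1)).filter (fun x => n % x = 0)).filter
        (fun x => n / x ≠ x ∧ n / x < n), dct.getD ((n / x : Nat) : Int) 0
      = ∑ x ∈ ((Finset.Ico 1 n).filter (fun x => n % x = 0)).filter (fun x => ¬ x * x ≤ n),
          dct.getD (x : Int) 0 := by
    apply Finset.sum_nbij' (fun x => n / x) (fun y => n / y)
    · intro x hx
      simp only [Finset.mem_filter, Finset.mem_Ico] at hx ⊢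
      obtain ⟨⟨⟨hx1, hx2⟩, hx3⟩, hne, hlt⟩ := hx
      have hdvd : x ∣ n := Nat.dvd_iff_mod_eq_zero.mpr hx3
      have hq : n / x * x = n := Nat.div_mul_cancel hdvd
      have hxx : x * x ≤ n := Nat.le_sqrt.mp (by omega)
      have hq1 : 1 ≤ n / x := by
        rcases Nat.eq_zero_or_pos (n / x) with h0 | h0
        · rw [h0] at hq; omega
        · exact h0
      refine ⟨⟨⟨hq1, hlt⟩, Nat.dvd_iff_mod_eq_zero.mp (Nat.div_dvd_of_dvd hdvd)⟩, ?_⟩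
      intro hqq
      have h1 : n / x * (n / x) ≤ n / x * x := by rw [hq]; exact hqq
      have h2 : x * x ≤ n / x * x := by rw [hq]; exact hxx
      have hqx : n / x ≤ x := Nat.le_of_mul_le_mul_left h1 (by omega)
      have hxq : x ≤ n / x := Nat.le_of_mul_le_mul_right h2 (by omega)
      exact hne (by omega)
    · intro y hy
      simp only [Finset.mem_filter, Finset.mem_Ico] at hy ⊢
      obtain ⟨⟨⟨hy1, hy2⟩, hy3⟩, hyy⟩ := hy
      have hdvd : y ∣ n := Nat.dvd_iff_mod_eq_zero.mpr hy3
      have hq : n / y * y = n := Nat.div_mul_cancel hdvd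
      have hx1 : 1 ≤ n / y := by
        rcases Nat.eq_zero_or_pos (n / y) with h0 | h0
        · rw [h0] at hq; omega
        · exact h0
      have hxlty : n / y < y := by
        by_contra hge
        have : y * y ≤ n / y * y := Nat.mul_le_mul_right y (by omega)
        omega
      have hxx : n / y * (n / y) ≤ n := by
        calc n / y * (n / y) ≤ n / y * y := Nat.mul_le_mul_left _ (by omega)
        _ = n := hq
      have hrec : n / (n / y) = y := Nat.div_div_self hdvd (by omega)
      refine ⟨⟨⟨hx1, by have := Nat.le_sqrt.mpr hxx; omega⟩,
        Nat.dvd_iff_mod_eq_zero.mp (Nat.div_dvd_of_dvd hdvd)⟩, ?_, ?_⟩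
      · rw [hrec]; omega
      · rw [hrec]; omega
    · intro x hx
      simp only [Finset.mem_filter, Finset.mem_Ico] at hx
      obtain ⟨⟨⟨hx1, hx2⟩, hx3⟩, hne, hlt⟩ := hx
      exact Nat.div_div_self (Nat.dvd_iff_mod_eq_zero.mpr hx3) (by omega)
    · intro y hy
      simp only [Finset.mem_filter, Finset.mem_Ico] at hy
      obtain ⟨⟨⟨hy1, hy2⟩, hy3⟩, hyy⟩ := hy
      exact Nat.div_div_self (Nat.dvd_iff_mod_eq_zero.mpr hy3) (by omega)
    · intro x hx
      rfl
  rw [hsmall, hbij]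
  exact Finset.sum_filter_add_sum_filter_not _ _ _

lemma simHeightB_eq_simAt (dct : PySem.Dict Int Int) (k : Nat) :
    simHeightB dct (k + 1) = simAt dct k k := by
  unfold simHeightB
  rw [sqrtLoopB_eq_sum, divisor_pairing dct (k + 1) (by omega), simAt_eq_sum]
  simp

lemma applySpellA_length (sim : List Int) (j i : Nat) (diff : Int) :
    (applySpellA sim j i diff).length = sim.length := by
  induction sim, j using applySpellA.induct i diff with
  | case1 sim j h ih =>
    rw [applySpellA]; simp [h] at ih ⊢; omega
  | case2 sim j h =>
    rw [applySpellA]; simp [h]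

-- the indices the inner while loop touches, re-based: j+(i+1), j+2(i+1), … vs j, j+(i+1), …
lemma spell_cond (i j k : Nat) (hkj : k ≠ j) :
    (j + (i + 1) ≤ k ∧ (k - (j + (i + 1))) % (i + 1) = 0)
      ↔ (j ≤ k ∧ (k - j) % (i + 1) = 0) := by
  rw [← Nat.dvd_iff_mod_eq_zero, ← Nat.dvd_iff_mod_eq_zero]
  constructor
  · rintro ⟨h2, hd⟩
    refine ⟨by omega, ?_⟩
    have he : k - j = (k - (j + (i + 1))) + (i + 1) := by omega
    rw [he]
    exact dvd_add hd dvd_rfl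
  · rintro ⟨h2, hd⟩
    have hge : i + 1 ≤ k - j := Nat.le_of_dvd (by omega) hd
    refine ⟨by omega, ?_⟩
    have he : k - (j + (i + 1)) = (k - j) - (i + 1) := by omega
    rw [he]
    exact Nat.dvd_sub hd dvd_rfl

lemma applySpellA_getD (sim : List Int) (j i : Nat) (diff : Int) (k : Nat) (hk : k < sim.length) :
    (applySpellA sim j i diff).getD k 0
      = sim.getD k 0 + (if j ≤ k ∧ (k - j) % (i + 1) = 0 then diff else 0) := by
  induction sim, j using applySpellA.induct i diff with
  | case1 sim j h ih =>
    rw [applySpellA]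
    simp only [h, dif_pos]
    rw [ih (by simpa using hk)]
    rw [List.getD_eq_getElem?_getD, List.getElem?_set]
    by_cases hkj : k = j
    · subst hkj
      rw [if_pos rfl, if_pos hk]
      rw [if_neg (fun hc => by omega : ¬(k + (i + 1) ≤ k ∧ (k - (k + (i + 1))) % (i + 1) = 0))]
      rw [if_pos ⟨le_refl k, by simp⟩]
      simp [List.getD_eq_getElem?_getD]
    · rw [if_neg (fun hc => hkj hc.symm), ← List.getD_eq_getElem?_getD]
      simp only [spell_cond i j k hkj]
  | case2 sim j h =>
    rw [applySpellA]
    simp only [h, dif_neg, not_false_iff]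
    rw [if_neg]; · ring
    intro ⟨h2, _⟩; omega

lemma simAt_insert_of_gt (dct : PySem.Dict Int Int) (m k : Nat) (q : Int) (v : Int)
    (hq : (m : Int) < q) :
    simAt (dct.insert q v) m k = simAt dct m k := by
  induction m with
  | zero => simp [simAt]
  | succ m ih =>
    rw [simAt_succ, simAt_succ, ih (by push_cast at hq ⊢; omega)]
    congr 1
    split_ifs with h
    · rw [PySem.Dict.getD_insert_of_ne]
      intro he; push_cast at hq; omega
    · rfl

-- 'simulated[k] gets diff' (k ∈ {i, i+2(i+1)-…}, i.e. i ≤ k, (i+1) ∣ k-i) iff (i+1) ∣ k+1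
lemma spell_cond_start (m k : Nat) :
    (m ≤ k ∧ (k - m) % (m + 1) = 0) ↔ (k + 1) % (m + 1) = 0 := by
  rw [← Nat.dvd_iff_mod_eq_zero, ← Nat.dvd_iff_mod_eq_zero]
  constructor
  · rintro ⟨h2, hd⟩
    have he : k + 1 = (k - m) + (m + 1) := by omega
    rw [he]
    exact dvd_add hd dvd_rfl
  · intro hd
    have hge : m + 1 ≤ k + 1 := Nat.le_of_dvd (by omega) hd
    refine ⟨by omega, ?_⟩
    have he : k - m = (k + 1) - (m + 1) := by omega
    rw [he]
    exact Nat.dvd_sub hd dvd_rfl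

lemma getD_zero_of_keys_bound (dct : PySem.Dict Int Int) (q : Int)
    (hq : q ∉ dct.keys) : dct.getD q 0 = 0 := by
  apply PySem.Dict.getD_of_not_contains
  cases hc : dct.contains q
  · rfl
  · exact absurd ((PySem.Dict.contains_iff_mem_keys dct q).mp hc) hq

-- the coupled loop invariant: after m steps the spell lists agree, A's simulated array
-- is the divisor-sum of B's recorded diffs, and B's dict keys are 1..m
lemma main_inv (numbers : List Int) (m : Nat) (hm : m ≤ numbers.length) :
    ((List.range m).foldl (stepA numbers) (List.replicate numbers.length (0 : Int), [])).1.length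
        = numbers.length ∧
    ((List.range m).foldl (stepA numbers) (List.replicate numbers.length (0 : Int), [])).2
        = ((List.range m).foldl (stepB numbers) ([], PySem.Dict.empty)).1 ∧
    (∀ q ∈ ((List.range m).foldl (stepB numbers) ([], PySem.Dict.empty)).2.keys,
        1 ≤ q ∧ q ≤ (m : Int)) ∧
    (∀ k, k < numbers.length →
        ((List.range m).foldl (stepA numbers) (List.replicate numbers.length (0 : Int), [])).1.getD k 0
          = simAt ((List.range m).foldl (stepB numbers) ([], PySem.Dict.empty)).2 m k) := by
  induction m with
  | zero =>
    refine ⟨by simp, by simp, by simp [PySem.Dict.keys_empty], ?_⟩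
    intro k hk
    simp [simAt, List.getD_eq_getElem?_getD, hk]
  | succ m ih =>
    obtain ⟨hlen, hsp, hkeys, hsim⟩ := ih (by omega)
    simp only [List.range_succ, List.foldl_append, List.foldl_cons, List.foldl_nil]
    set stA := (List.range m).foldl (stepA numbers) (List.replicate numbers.length (0 : Int), []) with hstA
    set stB := (List.range m).foldl (stepB numbers) ([], PySem.Dict.empty) with hstB
    have hmlt : m < numbers.length := by omega
    have hsimh : stA.1.getD m 0 = simHeightB stB.2 (m + 1) := by
      rw [simHeightB_eq_simAt]
      exact hsim m hmlt
    unfold stepA stepB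
    simp only []
    rw [← hsimh]
    by_cases hc : numbers.getD m 0 > stA.1.getD m 0
    · rw [if_pos hc, if_pos hc]
      have hcast : ((m + 1 : Nat) : Int) = (m : Int) + 1 := by push_cast; ring
      refine ⟨?_, ?_, ?_, ?_⟩
      · rw [applySpellA_length]; exact hlen
      · rw [hsp, hcast]
      · intro q hq
        rw [PySem.Dict.mem_keys_insert] at hq
        rcases hq with hq | hq
        · rw [hq, hcast]; refine ⟨by omega, by push_cast; omega⟩
        · have := hkeys q hq
          push_cast
          omega
      · intro k hk
        rw [applySpellA_getD _ _ _ _ _ (by rw [hlen]; exact hk)]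
        rw [hsim k hk, hsimh]
        rw [simAt_succ, simAt_insert_of_gt _ _ _ _ _ (by rw [hcast]; omega)]
        congr 1
        rw [if_congr (spell_cond_start m k) rfl rfl]
        split_ifs with h2
        · rw [← hcast, PySem.Dict.getD_insert_self]
        · rfl
    · rw [if_neg hc, if_neg hc]
      refine ⟨hlen, hsp, ?_, ?_⟩
      · intro q hq
        have := hkeys q hq
        push_cast
        omega
      · intro k hk
        rw [hsim k hk, simAt_succ]
        rw [getD_zero_of_keys_bound]
        · simp
        · intro hmem
          have := hkeys _ hmem
          omega

-- ===== VERDICT (by name: the statement is the Claim_ definition above) =====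
theorem get_spell_numbers_spec : Claim_equal_get_spell_numbers := by
  intro numbers _
  unfold Spec_get_spell_numbers get_spell_numbers get_spell_numbers_alt
  exact (main_inv numbers numbers.length (le_refl _)).2.1
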